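-- pv_equiv track=rewrite | github.com/younhwan97/algorithm-practice | python/COS Pro 1/COS-2-3-경품당첨.py | solution
-- ===== SOURCE A (Python) =====
-- def func_a(n):
--     ret = 1 # 1 -> 10 -> 100 ..
--     while n > 0:
--         ret *= 10
--         n -= 1
--     return ret
--
-- def func_b(n):
--     ret = 0 # 1 -> 2 -> 3 -> 4 ..
--     while n > 0:
--         ret += 1
--         n //= 10
--     return ret
--
-- def func_c(n):
--     ret = 0
--     while n > 0:
--         ret += n%10
--         n //= 10
--     return ret
--
-- def solution(num):
--     next_num = num
--     while True:
--         next_num += 1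
--         length = func_b(next_num)
--         if length % 2:
--             continue
--
--         divisor = func_a(length // 2)
--         front = next_num // divisor
--         back = next_num % divisor
--
--         front_sum = func_c(front)
--         back_sum = func_c(back)
--
--         if front_sum == back_sum:
--             break
--
--     return next_num
-- ===== SOURCE B (Python) =====
-- def _digits(n):
--     # most-significant-first decimal digits; [] for n <= 0
--     ds = []
--     while n > 0:
--         ds.append(n % 10)
--         n //= 10
--     ds.reverse()
--     return ds
--
-- def solution(num):
--     n = num + 1
--     while True:
--         ds = _digits(n)
--         L = len(ds)
--         if L % 2 == 1:
--             n = 10 ** L          # skip the whole odd-digit-count range at once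
--             continue
--         h = L // 2
--         if sum(ds[:h]) == sum(ds[h:]):
--             return n
--         n += 1
-- ===== Notes on version B (the rewrite author's own statement) =====
-- stated objective: alternative
-- what changed: B tests candidates via an explicit digit list (one split + two list sums) instead of A's three arithmetic helper loops, and when a candidate has an odd digit count B jumps directly to the next power of ten, skipping the whole odd-length range that A scans number by number.
import Mathlib
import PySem

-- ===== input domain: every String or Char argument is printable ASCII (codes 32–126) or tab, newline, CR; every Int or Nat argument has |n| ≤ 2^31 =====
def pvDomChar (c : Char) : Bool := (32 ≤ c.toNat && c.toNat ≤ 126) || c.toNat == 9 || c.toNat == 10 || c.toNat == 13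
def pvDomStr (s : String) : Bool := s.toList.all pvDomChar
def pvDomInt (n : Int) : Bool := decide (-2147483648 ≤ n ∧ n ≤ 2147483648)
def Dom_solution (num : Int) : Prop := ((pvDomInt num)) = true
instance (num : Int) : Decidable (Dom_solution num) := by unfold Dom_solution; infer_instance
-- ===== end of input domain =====

-- B replaces A's per-number arithmetic helpers by one digit-list split and jumps over whole
-- odd-digit-count ranges instead of scanning them number by number (objective: alternative).


-- ===== PORT A =====
-- func_a: while n > 0: ret *= 10; n -= 1
def funcALoop (ret n : Int) : Int :=
  if 0 < n then funcALoop (ret * 10) (n - 1) else ret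
termination_by n.toNat
decreasing_by omega

def funcA (n : Int) : Int := funcALoop 1 n

-- func_b: while n > 0: ret += 1; n //= 10
def funcBLoop (ret n : Int) : Int :=
  if h : 0 < n then funcBLoop (ret + 1) (PySem.Int.floordiv n 10) else ret
termination_by n.toNat
decreasing_by rw [PySem.Int.floordiv_eq_ediv_of_pos (by omega)]; omega

def funcB (n : Int) : Int := funcBLoop 0 n

-- func_c: while n > 0: ret += n % 10; n //= 10
def funcCLoop (ret n : Int) : Int :=
  if _h : 0 < n then funcCLoop (ret + PySem.Int.mod n 10) (PySem.Int.floordiv n 10) else ret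
termination_by n.toNat
decreasing_by rw [PySem.Int.floordiv_eq_ediv_of_pos (by omega)]; omega

def funcC (n : Int) : Int := funcCLoop 0 n

-- A's `while True` loop; the Nat fuel only makes the recursion structural (it is proved
-- sufficient for every input in Dom_solution below), the body is A's code step for step.
def solLoop (fuel : Nat) (next_num : Int) : Int :=
  match fuel with
  | 0 => next_num
  | fuel + 1 =>
    let nn := next_num + 1
    let length := funcB nn
    if PySem.Int.mod length 2 ≠ 0 then solLoop fuel nn
    else
      let divisor := funcA (PySem.Int.floordiv length 2)
      let front := PySem.Int.floordiv nn divisor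
      let back := PySem.Int.mod nn divisor
      if funcC front = funcC back then nn else solLoop fuel nn

def solution (num : Int) : Int := solLoop 20000000000 num

-- ===== PORT B =====
-- _digits: ds = []; while n > 0: ds.append(n % 10); n //= 10; ds.reverse()
def pyDigitsRev (n : Int) : List Int :=
  if _h : 0 < n then PySem.Int.mod n 10 :: pyDigitsRev (PySem.Int.floordiv n 10) else []
termination_by n.toNat
decreasing_by rw [PySem.Int.floordiv_eq_ediv_of_pos (by omega)]; omega

def pyDigits (n : Int) : List Int := (pyDigitsRev n).reverse

-- B's loop: check the candidate via its digit list; on an odd digit count jump to 10 ** L.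
-- Fuel as above: a totality device only, proved sufficient on Dom_solution.
def solAltLoop (fuel : Nat) (n : Int) : Int :=
  match fuel with
  | 0 => n
  | fuel + 1 =>
    let ds := pyDigits n
    let L := ds.length
    if L % 2 = 1 then solAltLoop fuel ((10 : Int) ^ L)
    else
      let h := L / 2
      if (ds.take h).sum = (ds.drop h).sum then n else solAltLoop fuel (n + 1)

def solution_alt (num : Int) : Int := solAltLoop 20000000000 (num + 1)

-- ===== PRECONDITION & SPEC =====
def Spec_solution (num : Int) (out : Int) : Prop := out = solution_alt num
instance (num : Int) (out : Int) : Decidable (Spec_solution num out) := by unfold Spec_solution; infer_instance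

-- ===== CLAIM (what is proved, stated in full; the proofs are below) =====
def Claim_equal_solution : Prop := ∀ (num : Int), Dom_solution num → Spec_solution num (solution num)

-- ===== LEMMAS AND PROOFS =====

-- the common candidate predicate: even digit count and equal half sums
def balP (n : Int) : Bool :=
  (pyDigits n).length % 2 == 0 &&
    ((pyDigits n).take ((pyDigits n).length / 2)).sum == ((pyDigits n).drop ((pyDigits n).length / 2)).sum

theorem pyDigitsRev_eq_digits (n : Int) :
    pyDigitsRev n = (Nat.digits 10 n.toNat).map (Nat.cast : Nat → Int) := by
  fun_induction pyDigitsRev n with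
  | case1 n h ih =>
    rw [ih, Nat.digits_def' (by norm_num : (1:ℕ) < 10) (by omega : 0 < n.toNat)]
    rw [PySem.Int.mod_eq_emod_of_pos (by norm_num), PySem.Int.floordiv_eq_ediv_of_pos (by norm_num)]
    have h1 : n % 10 = ((n.toNat % 10 : Nat) : Int) := by omega
    have h2 : (n / 10).toNat = n.toNat / 10 := by omega
    simp [h1, h2]
  | case2 n h =>
    have : n.toNat = 0 := by omega
    simp [this]

theorem funcBLoop_eq (ret n : Int) : funcBLoop ret n = ret + ((pyDigitsRev n).length : Int) := by
  fun_induction funcBLoop ret n with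
  | case1 ret n h ih =>
    rw [ih]
    conv_rhs => rw [pyDigitsRev, dif_pos h]
    simp [List.length_cons]
    ring
  | case2 ret n h =>
    rw [pyDigitsRev, dif_neg h]
    simp

theorem funcCLoop_eq (ret n : Int) : funcCLoop ret n = ret + (pyDigitsRev n).sum := by
  fun_induction funcCLoop ret n with
  | case1 ret n h ih =>
    rw [ih]
    conv_rhs => rw [pyDigitsRev, dif_pos h]
    simp
    ring
  | case2 ret n h =>
    rw [pyDigitsRev, dif_neg h]
    simp

theorem funcALoop_eq (ret n : Int) : funcALoop ret n = ret * 10 ^ n.toNat := by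
  fun_induction funcALoop ret n with
  | case1 ret n h ih =>
    rw [ih]
    have : n.toNat = (n - 1).toNat + 1 := by omega
    rw [this, pow_succ]
    ring
  | case2 ret n h =>
    have : n.toNat = 0 := by omega
    simp [this]

theorem digits_len_le_iff (m k : Nat) : (Nat.digits 10 m).length ≤ k ↔ m < 10 ^ k := by
  rcases Nat.eq_zero_or_pos m with rfl | hm
  · simp only [Nat.digits_zero, List.length_nil, Nat.zero_le, true_iff]
    positivity
  · rw [Nat.length_digits 10 m (by norm_num) (by omega),
      ← Nat.log_lt_iff_lt_pow (by norm_num) (by omega)]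
    omega

theorem digits_div_pow (m k : Nat) :
    Nat.digits 10 (m / 10 ^ k) = (Nat.digits 10 m).drop k := by
  induction k generalizing m with
  | zero => simp
  | succ k ih =>
    rcases Nat.eq_zero_or_pos m with rfl | hm
    · simp
    · have hsplit : m / 10 ^ (k + 1) = m / 10 / 10 ^ k := by
        rw [Nat.div_div_eq_div_mul, pow_succ']
      rw [hsplit, ih, Nat.digits_def' (by norm_num : (1:ℕ) < 10) hm]
      simp

theorem digits_mod_pow_sum (m k : Nat) :
    (Nat.digits 10 (m % 10 ^ k)).sum = ((Nat.digits 10 m).take k).sum := by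
  induction k generalizing m with
  | zero => simp [Nat.mod_one]
  | succ k ih =>
    rcases Nat.eq_zero_or_pos m with rfl | hm
    · simp
    · have hsplit : m % 10 ^ (k + 1) = m % 10 + 10 * (m / 10 % 10 ^ k) := by
        rw [pow_succ', Nat.mod_mul]
      rw [hsplit, Nat.digits_def' (by norm_num : (1:ℕ) < 10) hm]
      simp only [List.take_succ_cons, List.sum_cons]
      rw [← ih (m / 10)]
      rcases Nat.eq_zero_or_pos (m % 10 + 10 * (m / 10 % 10 ^ k)) with hz | hp
      · have h1 : m % 10 = 0 := by omega
        have h2 : m / 10 % 10 ^ k = 0 := by omega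
        simp [h1, h2]
      · rw [Nat.digits_def' (by norm_num : (1:ℕ) < 10) hp]
        have hlt : m % 10 < 10 := Nat.mod_lt _ (by norm_num)
        have e1 : (m % 10 + 10 * (m / 10 % 10 ^ k)) % 10 = m % 10 := by omega
        have e2 : (m % 10 + 10 * (m / 10 % 10 ^ k)) / 10 = m / 10 % 10 ^ k := by omega
        rw [e1, e2]
        simp

theorem balP_nonpos {n : Int} (h : n ≤ 0) : balP n = true := by
  rw [balP, pyDigits, pyDigitsRev, dif_neg (by omega : ¬ 0 < n)]
  simp

theorem balP_of_odd {n : Int} (h : (pyDigits n).length % 2 = 1) : balP n = false := by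
  rw [balP, h]
  simp

theorem length_pyDigits (n : Int) : (pyDigits n).length = (Nat.digits 10 n.toNat).length := by
  rw [pyDigits, List.length_reverse, pyDigitsRev_eq_digits]
  simp

theorem len_eq_of_between {n t : Int} (hn : 0 < n) (hnt : n ≤ t)
    (ht : t < 10 ^ (pyDigits n).length) : (pyDigits t).length = (pyDigits n).length := by
  rw [length_pyDigits, length_pyDigits]
  set L := (Nat.digits 10 n.toNat).length with hL
  have hLpy : (pyDigits n).length = L := by rw [length_pyDigits]
  rw [hLpy] at ht
  have hL1 : 1 ≤ L := by
    have hne : Nat.digits 10 n.toNat ≠ [] := Nat.digits_ne_nil_iff_ne_zero.mpr (by omega)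
    have := List.length_pos_iff.mpr hne
    omega
  have hcast : ((10 : Int) ^ L) = ((10 ^ L : Nat) : Int) := by push_cast; ring
  have hub : t.toNat < 10 ^ L := by omega
  have hlb : ¬ n.toNat < 10 ^ (L - 1) := by
    intro hlt
    have := (digits_len_le_iff n.toNat (L - 1)).mpr hlt
    omega
  have h1 : (Nat.digits 10 t.toNat).length ≤ L := (digits_len_le_iff _ _).mpr hub
  have h2 : ¬ (Nat.digits 10 t.toNat).length ≤ L - 1 := by
    intro hle
    have := (digits_len_le_iff t.toNat (L - 1)).mp hle
    omega
  omega

theorem funcB_eq (n : Int) : funcB n = ((pyDigitsRev n).length : Int) := by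
  rw [funcB, funcBLoop_eq]; ring

theorem funcA_eq (n : Int) : funcA n = 10 ^ n.toNat := by
  rw [funcA, funcALoop_eq]; ring

theorem cast_sum_eq (l : List Nat) : (l.map (Nat.cast : Nat → Int)).sum = (l.sum : Int) := by
  induction l with
  | nil => simp
  | cons a l ih =>
    rw [List.map_cons, List.sum_cons, List.sum_cons, ih]
    push_cast
    ring

theorem funcC_digits (n : Int) : funcC n = ((Nat.digits 10 n.toNat).sum : Int) := by
  rw [funcC, funcCLoop_eq, pyDigitsRev_eq_digits, zero_add]
  exact cast_sum_eq _

theorem sum_reverse_take (l : List Int) (k : Nat) :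
    (l.reverse.take k).sum = (l.drop (l.length - k)).sum := by
  rw [List.take_reverse, List.sum_reverse]

theorem sum_reverse_drop (l : List Int) (k : Nat) :
    (l.reverse.drop k).sum = (l.take (l.length - k)).sum := by
  rw [List.drop_reverse, List.sum_reverse]

theorem solLoop_succ (f : Nat) (c : Int) :
    solLoop (f + 1) c = if balP (c + 1) then c + 1 else solLoop f (c + 1) := by
  rw [solLoop]
  simp only [funcB_eq, funcA_eq]
  set nn := c + 1 with hnn
  set L := (pyDigitsRev nn).length with hLdef
  have hLpy : (pyDigits nn).length = L := by rw [pyDigits, List.length_reverse]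
  have hmod2 : PySem.Int.mod ((L : Nat) : Int) 2 = ((L % 2 : Nat) : Int) := by
    exact_mod_cast PySem.Int.mod_natCast L 2
  have hdiv2 : PySem.Int.floordiv ((L : Nat) : Int) 2 = ((L / 2 : Nat) : Int) := by
    exact_mod_cast PySem.Int.floordiv_natCast L 2
  rw [hmod2, hdiv2]
  by_cases hodd : L % 2 = 1
  · rw [if_pos (by rw [hodd]; norm_num), balP_of_odd (by rw [hLpy]; exact hodd)]
    simp
  · have heven : L % 2 = 0 := by omega
    rw [if_neg (by rw [heven]; norm_num)]
    have htn : (((L / 2 : Nat) : Int)).toNat = L / 2 := Int.toNat_natCast _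
    rw [htn]
    by_cases hpos : 0 < nn
    · -- nn > 0: compare A's arithmetic split with B's list split
      have hm : nn = ((nn.toNat : Nat) : Int) := by omega
      have hpow : ((10 : Int) ^ (L / 2)) = ((10 ^ (L / 2) : Nat) : Int) := by push_cast; ring
      have hfront : PySem.Int.floordiv nn ((10 : Int) ^ (L / 2))
          = ((nn.toNat / 10 ^ (L / 2) : Nat) : Int) := by
        rw [hpow]
        conv_lhs => rw [hm]
        exact PySem.Int.floordiv_natCast _ _
      have hback : PySem.Int.mod nn ((10 : Int) ^ (L / 2))
          = ((nn.toNat % 10 ^ (L / 2) : Nat) : Int) := by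
        rw [hpow]
        conv_lhs => rw [hm]
        exact PySem.Int.mod_natCast _ _
      have hcf : funcC (PySem.Int.floordiv nn ((10 : Int) ^ (L / 2)))
          = ((((Nat.digits 10 nn.toNat).drop (L / 2)).sum : Nat) : Int) := by
        rw [hfront, funcC_digits, Int.toNat_natCast, digits_div_pow]
      have hcb : funcC (PySem.Int.mod nn ((10 : Int) ^ (L / 2)))
          = ((((Nat.digits 10 nn.toNat).take (L / 2)).sum : Nat) : Int) := by
        rw [hback, funcC_digits, Int.toNat_natCast, digits_mod_pow_sum]
      rw [hcf, hcb]
      -- B's condition, rewritten to the same Nat sums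
      have hrev : pyDigitsRev nn = (Nat.digits 10 nn.toNat).map (Nat.cast : Nat → Int) :=
        pyDigitsRev_eq_digits nn
      have hhalf : L - L / 2 = L / 2 := by omega
      have hlenm : ((Nat.digits 10 nn.toNat).map (Nat.cast : Nat → Int)).length = L := by
        rw [List.length_map, hLdef, pyDigitsRev_eq_digits, List.length_map]
      have hds1 : ((pyDigits nn).take (L / 2)).sum
          = ((((Nat.digits 10 nn.toNat).drop (L / 2)).sum : Nat) : Int) := by
        rw [pyDigits, hrev, sum_reverse_take, hlenm, hhalf, ← List.map_drop, cast_sum_eq]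
      have hds2 : ((pyDigits nn).drop (L / 2)).sum
          = ((((Nat.digits 10 nn.toNat).take (L / 2)).sum : Nat) : Int) := by
        rw [pyDigits, hrev, sum_reverse_drop, hlenm, hhalf, ← List.map_take, cast_sum_eq]
      rw [balP, hLpy, hds1, hds2]
      simp [heven]
    · -- nn ≤ 0: A's check degenerates to funcC nn = funcC 0, both 0; balP nn is true
      have hz : pyDigitsRev nn = [] := by rw [pyDigitsRev, dif_neg hpos]
      have hL0 : L = 0 := by rw [hLdef, hz]; rfl
      have hd1 : PySem.Int.floordiv nn ((10 : Int) ^ (L / 2)) = nn := by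
        rw [hL0]
        norm_num [PySem.Int.floordiv_eq_ediv_of_pos (by norm_num : (0:Int) < 1)]
      have hd2 : PySem.Int.mod nn ((10 : Int) ^ (L / 2)) = 0 := by
        rw [hL0]
        norm_num [PySem.Int.mod_eq_emod_of_pos (by norm_num : (0:Int) < 1), Int.emod_one]
      have hc1 : funcC nn = 0 := by rw [funcC, funcCLoop_eq, hz]; simp
      have hc2 : funcC 0 = 0 := by
        rw [funcC, funcCLoop_eq, pyDigitsRev, dif_neg (by norm_num : ¬ (0:Int) < 0)]
        simp
      rw [hd1, hd2, hc1, hc2, balP_nonpos (by omega : nn ≤ 0)]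
      simp

theorem A_finds : ∀ (f : Nat) (c t : Int), c < t → t ≤ c + (f : Int) → balP t = true →
    (∀ m, c < m → m < t → balP m = false) → solLoop f c = t := by
  intro f
  induction f with
  | zero => intro c t h1 h2 _ _; exfalso; omega
  | succ f ih =>
    intro c t h1 h2 hP hmin
    rw [solLoop_succ]
    by_cases hc : c + 1 = t
    · rw [hc, hP]; simp
    · have hlt : c + 1 < t := by omega
      rw [hmin (c + 1) (by omega) hlt]
      simp only [Bool.false_eq_true, if_false]
      exact ih (c + 1) t hlt (by push_cast at h2 ⊢; omega) hP
        (fun m hm1 hm2 => hmin m (by omega) hm2)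

theorem B_finds : ∀ (f : Nat) (n t : Int), n ≤ t → t ≤ n + (f : Int) → balP t = true →
    (∀ m, n ≤ m → m < t → balP m = false) → solAltLoop f n = t := by
  intro f
  induction f with
  | zero =>
    intro n t h1 h2 _ _
    have : n = t := by omega
    simp [solAltLoop, this]
  | succ f ih =>
    intro n t h1 h2 hP hmin
    rw [solAltLoop]
    simp only []
    by_cases hodd : (pyDigits n).length % 2 = 1
    · rw [if_pos hodd]
      -- n itself is unbalanced, and so is every m with n ≤ m < 10 ^ L
      have hPn : balP n = false := balP_of_odd hodd
      have hnt : n < t := by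
        rcases lt_or_eq_of_le h1 with h | h
        · exact h
        · rw [h] at hPn; rw [hPn] at hP; exact absurd hP (by simp)
      have hn0 : 0 < n := by
        by_contra hle
        have := balP_nonpos (by omega : n ≤ 0)
        rw [this] at hPn; exact absurd hPn (by simp)
      set L := (pyDigits n).length with hL
      have hjump : (10 : Int) ^ L ≤ t := by
        by_contra hlt
        push Not at hlt
        have hlen : (pyDigits t).length = L := len_eq_of_between hn0 h1 hlt
        have : balP t = false := balP_of_odd (by rw [hlen]; exact hodd)
        rw [this] at hP; exact absurd hP (by simp)
      have hn10 : n < (10 : Int) ^ L := by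
        have h1' : n.toNat < 10 ^ L := by
          have := (digits_len_le_iff n.toNat L).mp (le_of_eq (length_pyDigits n).symm)
          exact this
        have hc : ((10:Int) ^ L) = ((10 ^ L : Nat) : Int) := by push_cast; ring
        omega
      exact ih ((10 : Int) ^ L) t hjump (by push_cast at h2 ⊢; omega) hP
        (fun m hm1 hm2 => hmin m (by omega) hm2)
    · rw [if_neg hodd]
      by_cases heq :
          ((pyDigits n).take ((pyDigits n).length / 2)).sum = ((pyDigits n).drop ((pyDigits n).length / 2)).sum
      · rw [if_pos heq]
        -- balP n holds, so n must be t
        have hPn : balP n = true := by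
          rw [balP]
          simp [heq, Nat.mod_two_ne_one.mp hodd]
        by_contra hne
        have : n < t := by omega
        have := hmin n (le_refl n) this
        rw [this] at hPn; exact absurd hPn (by simp)
      · rw [if_neg heq]
        have hPn : balP n = false := by
          rw [balP]
          simp [heq]
        have hnt : n < t := by
          rcases lt_or_eq_of_le h1 with h | h
          · exact h
          · rw [h] at hPn; rw [hPn] at hP; exact absurd hP (by simp)
        exact ih (n + 1) t (by omega) (by push_cast at h2 ⊢; omega) hP
          (fun m hm1 hm2 => hmin m (by omega) hm2)

theorem pyDigitsRev_big : pyDigitsRev 9999999999 = [9, 9, 9, 9, 9, 9, 9, 9, 9, 9] := by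
  have hd0 : Nat.digits 10 9 = [9] := by
    rw [Nat.digits_def' (by norm_num : (1:ℕ) < 10) (by norm_num : 0 < 9)]
    norm_num
  have hd1 : Nat.digits 10 99 = [9, 9] := by
    rw [Nat.digits_def' (by norm_num : (1:ℕ) < 10) (by norm_num : 0 < 99)]
    norm_num [hd0]
  have hd2 : Nat.digits 10 999 = [9, 9, 9] := by
    rw [Nat.digits_def' (by norm_num : (1:ℕ) < 10) (by norm_num : 0 < 999)]
    norm_num [hd1]
  have hd3 : Nat.digits 10 9999 = [9, 9, 9, 9] := by
    rw [Nat.digits_def' (by norm_num : (1:ℕ) < 10) (by norm_num : 0 < 9999)]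
    norm_num [hd2]
  have hd4 : Nat.digits 10 99999 = [9, 9, 9, 9, 9] := by
    rw [Nat.digits_def' (by norm_num : (1:ℕ) < 10) (by norm_num : 0 < 99999)]
    norm_num [hd3]
  have hd5 : Nat.digits 10 999999 = [9, 9, 9, 9, 9, 9] := by
    rw [Nat.digits_def' (by norm_num : (1:ℕ) < 10) (by norm_num : 0 < 999999)]
    norm_num [hd4]
  have hd6 : Nat.digits 10 9999999 = [9, 9, 9, 9, 9, 9, 9] := by
    rw [Nat.digits_def' (by norm_num : (1:ℕ) < 10) (by norm_num : 0 < 9999999)]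
    norm_num [hd5]
  have hd7 : Nat.digits 10 99999999 = [9, 9, 9, 9, 9, 9, 9, 9] := by
    rw [Nat.digits_def' (by norm_num : (1:ℕ) < 10) (by norm_num : 0 < 99999999)]
    norm_num [hd6]
  have hd8 : Nat.digits 10 999999999 = [9, 9, 9, 9, 9, 9, 9, 9, 9] := by
    rw [Nat.digits_def' (by norm_num : (1:ℕ) < 10) (by norm_num : 0 < 999999999)]
    norm_num [hd7]
  have hd9 : Nat.digits 10 9999999999 = [9, 9, 9, 9, 9, 9, 9, 9, 9, 9] := by
    rw [Nat.digits_def' (by norm_num : (1:ℕ) < 10) (by norm_num : 0 < 9999999999)]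
    norm_num [hd8]
  rw [pyDigitsRev_eq_digits]
  have ht : (9999999999 : Int).toNat = 9999999999 := rfl
  rw [ht, hd9]
  norm_num

theorem balP_big : balP 9999999999 = true := by
  rw [balP, pyDigits, pyDigitsRev_big]
  decide

-- ===== VERDICT (by name: the statement is the Claim_ definition above) =====
theorem solution_spec : Claim_equal_solution := by
  intro num hdom
  have hb : -2147483648 ≤ num ∧ num ≤ 2147483648 := by
    simpa [Dom_solution, pvDomInt] using hdom
  show solution num = solution_alt num
  have hex : ∃ k : Nat, balP (num + 1 + (k : Int)) = true := by
    refine ⟨(9999999999 - (num + 1)).toNat, ?_⟩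
    have : num + 1 + ((9999999999 - (num + 1)).toNat : Int) = 9999999999 := by omega
    rw [this]; exact balP_big
  classical
  have hspec := Nat.find_spec hex
  set k := Nat.find hex with hk
  set t := num + 1 + (k : Int) with htdef
  have hkle : k ≤ (9999999999 - (num + 1)).toNat := by
    apply Nat.find_min' hex
    have : num + 1 + (((9999999999 - (num + 1)).toNat : Nat) : Int) = 9999999999 := by omega
    rw [this]; exact balP_big
  have htle : t ≤ 9999999999 := by omega
  have hmin : ∀ m, num < m → m < t → balP m = false := by
    intro m h1 h2
    have hj : m = num + 1 + ((m - (num + 1)).toNat : Int) := by omega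
    have hjk : (m - (num + 1)).toNat < k := by omega
    have := Nat.find_min hex hjk
    rw [← hj] at this
    exact Bool.not_eq_true _ ▸ (by simpa using this)
  have hA : solLoop 20000000000 num = t :=
    A_finds _ num t (by omega) (by push_cast; omega) hspec hmin
  have hB : solAltLoop 20000000000 (num + 1) = t :=
    B_finds _ (num + 1) t (by omega) (by push_cast; omega) hspec
      (fun m h1 h2 => hmin m (by omega) h2)
  unfold solution solution_alt
  rw [hA, hB]
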